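-- pv_equiv track=rewrite | github.com/valletw/aoc | day16.py | fft
-- ===== SOURCE A (Python) =====
-- def fft(signal):
--     output = []
--     size = len(signal)
--     for i in range(size):
--         tot = 0
--         mul = 1
--         for ofst in range(i, size, (i + 1) * 2):
--             tot += sum(signal[ofst:ofst + i + 1]) * mul
--             mul *= -1
--         output.append(abs(tot) % 10)
--     return output
-- ===== SOURCE B (Python) =====
-- def fft(sig):
--     n = len(sig)
--     prefix = [0]
--     acc = 0
--     for x in sig:
--         acc += x
--         prefix.append(acc)
--     out = []
--     for i in range(n):
--         width = i + 1
--         tot = 0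
--         sign = 1
--         for ofst in range(i, n, 2 * width):
--             tot += sign * (prefix[min(ofst + width, n)] - prefix[ofst])
--             sign = -sign
--         out.append(abs(tot) % 10)
--     return out
-- ===== Notes on version B (the rewrite author's own statement) =====
-- stated objective: faster
-- what changed: Replaces the O(n) slice re-summation inside each alternating block by a precomputed prefix-sum array so every block sum is an O(1) difference of two prefix values.
import Mathlib
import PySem

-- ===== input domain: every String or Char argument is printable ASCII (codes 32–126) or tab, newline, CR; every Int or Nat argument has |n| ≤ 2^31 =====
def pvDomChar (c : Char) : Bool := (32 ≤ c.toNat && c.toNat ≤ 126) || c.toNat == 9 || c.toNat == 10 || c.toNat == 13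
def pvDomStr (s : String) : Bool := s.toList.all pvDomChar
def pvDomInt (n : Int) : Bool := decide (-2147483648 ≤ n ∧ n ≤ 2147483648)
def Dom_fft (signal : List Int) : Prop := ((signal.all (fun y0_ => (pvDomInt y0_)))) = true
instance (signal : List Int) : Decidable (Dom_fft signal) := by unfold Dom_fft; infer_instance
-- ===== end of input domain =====

-- B replaces A's repeated O(n) slice re-summation by a prefix-sum array, making each
-- alternating block sum an O(1) difference (objective: faster, asymptotic).


-- ===== PORT A =====
def fft (signal : List Int) : List Int :=
  let size : Int := (signal.length : Int)
  (PySem.List.pyRange 0 size 1).foldl (fun output i =>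
    let p := (PySem.List.pyRange i size ((i + 1) * 2)).foldl
      (fun (tm : Int × Int) ofst =>
        (tm.1 + (PySem.List.slice signal (some ofst) (some (ofst + i + 1))).sum * tm.2,
         tm.2 * (-1)))
      (0, 1)
    output ++ [PySem.Int.mod |p.1| 10]) []

-- ===== PORT B =====
def fft_alt (signal : List Int) : List Int :=
  let n : Int := (signal.length : Int)
  let pre :=
    (signal.foldl (fun (pa : List Int × Int) x => (pa.1 ++ [pa.2 + x], pa.2 + x)) ([0], 0)).1
  (PySem.List.pyRange 0 n 1).foldl (fun out i =>
    let width := i + 1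
    let p := (PySem.List.pyRange i n (2 * width)).foldl
      (fun (ts : Int × Int) ofst =>
        (ts.1 + ts.2 * (PySem.List.pyGetD pre (min (ofst + width) n) 0
                        - PySem.List.pyGetD pre ofst 0),
         -ts.2))
      (0, 1)
    out ++ [PySem.Int.mod |p.1| 10]) []

-- ===== PRECONDITION & SPEC =====
def Spec_fft (signal : List Int) (out : List Int) : Prop := out = fft_alt signal
instance (signal : List Int) (out : List Int) : Decidable (Spec_fft signal out) := by unfold Spec_fft; infer_instance

-- ===== CLAIM (what is proved, stated in full; the proofs are below) =====
def Claim_equal_fft : Prop := ∀ (signal : List Int), Dom_fft signal → Spec_fft signal (fft signal)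

-- ===== LEMMAS AND PROOFS =====

-- B's prefix-building fold, characterised from an arbitrary start state.
lemma fft_prefix_fold (xs : List Int) (l : List Int) (s : Int) :
    (xs.foldl (fun (pa : List Int × Int) x => (pa.1 ++ [pa.2 + x], pa.2 + x)) (l, s))
    = (l ++ (List.range xs.length).map (fun k => s + (xs.take (k + 1)).sum), s + xs.sum) := by
  induction xs generalizing l s with
  | nil => simp
  | cons x xs ih =>
      simp only [List.foldl_cons, ih, List.length_cons, List.range_succ_eq_map,
        List.map_cons, List.map_map, List.sum_cons, Prod.mk.injEq]
      refine ⟨?_, by ring⟩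
      rw [List.append_assoc]
      congr 1
      simp only [List.singleton_append]
      congr 1
      · simp
      · apply List.map_congr_left
        intro k _
        simp [Function.comp, List.take_succ_cons]
        ring

-- B's prefix array is the list of partial sums.
lemma fft_prefix_eq (signal : List Int) :
    (signal.foldl (fun (pa : List Int × Int) x => (pa.1 ++ [pa.2 + x], pa.2 + x)) ([0], 0)).1
    = (List.range (signal.length + 1)).map (fun k => (signal.take k).sum) := by
  rw [fft_prefix_fold]
  simp [List.range_succ_eq_map, Function.comp]

-- Reading the prefix array at an in-range index.
lemma fft_pref_get (signal : List Int) (j : Int) (h0 : 0 ≤ j) (h1 : j ≤ (signal.length : Int)) :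
    PySem.List.pyGetD ((List.range (signal.length + 1)).map (fun k => (signal.take k).sum)) j 0
    = (signal.take j.toNat).sum := by
  rw [PySem.List.pyGetD_eq_getElem _ _ h0 (by simp; omega)]
  simp

-- Sum of a slice as a difference of partial sums.
lemma fft_slice_sum (signal : List Int) (a b : Int) (h0 : 0 ≤ a) (hab : a ≤ b) :
    (PySem.List.slice signal (some a) (some b)).sum
    = (signal.take (min b (signal.length : Int)).toNat).sum - (signal.take a.toNat).sum := by
  rw [PySem.List.slice_toNat signal h0 (le_trans h0 hab)]
  have h1 : ((signal.drop a.toNat).take (b.toNat - a.toNat)).sum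
      = (signal.take (a.toNat + (b.toNat - a.toNat))).sum - (signal.take a.toNat).sum := by
    rw [List.take_add, List.sum_append]; ring
  rw [h1]
  have h2 : a.toNat + (b.toNat - a.toNat) = b.toNat := by omega
  rw [h2]
  rcases le_or_gt b (signal.length : Int) with h | h
  · rw [min_eq_left h]
  · rw [min_eq_right (le_of_lt h)]
    have e1 : List.take b.toNat signal = signal := List.take_of_length_le (by omega)
    have e2 : List.take ((signal.length : Int)).toNat signal = signal :=
      List.take_of_length_le (by omega)
    rw [e1, e2]

-- ===== VERDICT (by name: the statement is the Claim_ definition above) =====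
theorem fft_spec : Claim_equal_fft := by
  intro signal _
  unfold Spec_fft fft fft_alt
  rw [fft_prefix_eq]
  apply PySem.List.foldl_congr_mem
  intro out i hi
  dsimp only
  rw [PySem.List.mem_pyRange_iff_of_pos (by omega)] at hi
  obtain ⟨hi0, hin, -⟩ := hi
  have hstep : (i + 1) * 2 = 2 * (i + 1) := by ring
  rw [hstep]
  refine congrArg (fun z : Int × Int => out ++ [PySem.Int.mod |z.1| 10]) ?_
  apply PySem.List.foldl_congr_mem
  intro tm ofst hofst
  rw [PySem.List.mem_pyRange_iff_of_pos (by omega)] at hofst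
  obtain ⟨ho0, hon, -⟩ := hofst
  have hb : ofst + i + 1 = ofst + (i + 1) := by ring
  rw [fft_slice_sum signal ofst (ofst + i + 1) (by omega) (by omega),
      fft_pref_get signal (min (ofst + (i + 1)) (signal.length : Int)) (by omega)
        (by exact min_le_right _ _),
      fft_pref_get signal ofst (by omega) (by omega), hb]
  simp only [Prod.mk.injEq]
  exact ⟨by ring, by ring⟩
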